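-- pv_equiv track=rewrite | github.com/nguyencongminh090/GomokuAI | Project/Python/Testing/Source v1/src/pattern.py | shift_line
-- ===== SOURCE A (Python) =====
-- def shift_line(line, i):
--     mid = len(line) // 2
--     shifted = [2] * len(line)
--     for j in range(len(line)):
--         idx = j + i - mid
--         if 0 <= idx < len(line):
--             shifted[j] = line[idx]
--     return shifted
-- ===== SOURCE B (Python) =====
-- def shift_line(line, i):
--     n = len(line)
--     offset = i - n // 2
--     start = min(n, max(0, -offset))
--     end = max(0, min(n, n - offset))
--     return [2] * start + line[start + offset:end + offset] + [2] * (n - end)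
-- ===== Notes on version B (the rewrite author's own statement) =====
-- stated objective: simpler
-- what changed: Replaced A's per-index loop with a bounds check on every element by closed-form overlap arithmetic: compute the overlap window once and build the result as pad ++ slice ++ pad.
import Mathlib
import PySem

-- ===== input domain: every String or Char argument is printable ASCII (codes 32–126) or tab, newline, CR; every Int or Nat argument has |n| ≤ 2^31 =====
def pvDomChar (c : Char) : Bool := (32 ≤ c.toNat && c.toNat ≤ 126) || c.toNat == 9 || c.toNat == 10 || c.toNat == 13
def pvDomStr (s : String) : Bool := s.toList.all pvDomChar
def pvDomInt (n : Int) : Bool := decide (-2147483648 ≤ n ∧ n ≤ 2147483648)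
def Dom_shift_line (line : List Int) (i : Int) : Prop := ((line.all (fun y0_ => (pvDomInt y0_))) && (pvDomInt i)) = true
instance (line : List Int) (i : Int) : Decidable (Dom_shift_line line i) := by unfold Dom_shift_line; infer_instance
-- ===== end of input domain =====

-- B replaces A's per-index bounds-checked loop by closed-form overlap arithmetic:
-- two replicate pads and one slice (objective: simpler, no per-element conditional).

-- ===== PORT A =====
def shift_line (line : List Int) (i : Int) : List Int :=
  let mid : Int := PySem.Int.floordiv (line.length : Int) 2
  let shifted : List Int := List.replicate line.length 2
  (PySem.List.pyRange 0 (line.length : Int) 1).foldl (fun acc j =>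
    let idx := j + i - mid
    if 0 ≤ idx ∧ idx < (line.length : Int) then
      PySem.List.pySetD acc j (PySem.List.pyGetD line idx 0)
    else acc) shifted

-- ===== PORT B =====
def shift_line_alt (line : List Int) (i : Int) : List Int :=
  let n : Int := (line.length : Int)
  let offset : Int := i - PySem.Int.floordiv n 2
  let start : Int := min n (max 0 (-offset))
  let stop : Int := max 0 (min n (n - offset))
  List.replicate start.toNat 2 ++
    PySem.List.slice line (some (start + offset)) (some (stop + offset)) ++
    List.replicate (n - stop).toNat 2

-- ===== PRECONDITION & SPEC =====
def Spec_shift_line (line : List Int) (i : Int) (out : List Int) : Prop := out = shift_line_alt line i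
instance (line : List Int) (i : Int) (out : List Int) : Decidable (Spec_shift_line line i out) := by unfold Spec_shift_line; infer_instance

-- ===== CLAIM (what is proved, stated in full; the proofs are below) =====
def Claim_equal_shift_line : Prop := ∀ (line : List Int) (i : Int), Dom_shift_line line i → Spec_shift_line line i (shift_line line i)

-- ===== LEMMAS AND PROOFS =====

lemma foldl_set_length (cond : Nat → Prop) [DecidablePred cond] (v : Nat → Int) :
    ∀ (m : Nat) (acc : List Int),
      ((List.range m).foldl (fun a k => if cond k then a.set k (v k) else a) acc).length
        = acc.length := by
  intro m
  induction m with
  | zero => simp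
  | succ m ih =>
      intro acc
      rw [List.range_succ, List.foldl_append]
      simp only [List.foldl_cons, List.foldl_nil]
      split <;> simp [ih]

lemma foldl_set_getElem? (cond : Nat → Prop) [DecidablePred cond] (v : Nat → Int) :
    ∀ (m : Nat) (acc : List Int) (j : Nat),
      ((List.range m).foldl (fun a k => if cond k then a.set k (v k) else a) acc)[j]? =
        if j < m ∧ cond j ∧ j < acc.length then some (v j) else acc[j]? := by
  intro m
  induction m with
  | zero => intro acc j; simp
  | succ m ih =>
      intro acc j
      rw [List.range_succ, List.foldl_append]
      simp only [List.foldl_cons, List.foldl_nil]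
      have hlen := foldl_set_length cond v m acc
      by_cases hc : cond m
      · simp only [if_pos hc, List.getElem?_set, hlen, ih]
        by_cases hj : j = m
        · subst hj
          by_cases hl : j < acc.length
          · simp [hl, hc]
          · simp [hl, hc]
        · simp only [if_neg (fun h => hj (Eq.symm h))]
          by_cases hcj : cond j
          · by_cases hjm : j < m
            · simp [hjm, hcj, Nat.lt_succ_of_lt hjm]
            · have : ¬ j < m + 1 := by omega
              simp [hjm, this]
          · simp [hcj]
      · simp only [if_neg hc, ih]
        by_cases hcj : cond j
        · by_cases hjm : j < m
          · simp [hjm, hcj, Nat.lt_succ_of_lt hjm]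
          · have hj : j ≠ m := fun h => hc (h ▸ hcj)
            have : ¬ j < m + 1 := by omega
            simp [hjm, this]
        · simp [hcj]

-- A, normalised to a fold over List.range with Nat indexing.
lemma shift_line_eq_fold (line : List Int) (i : Int) :
    shift_line line i =
      (List.range line.length).foldl
        (fun a (k : Nat) =>
          if 0 ≤ (k : Int) + i - PySem.Int.floordiv (line.length : Int) 2 ∧
              (k : Int) + i - PySem.Int.floordiv (line.length : Int) 2 < (line.length : Int)
          then a.set k (PySem.List.pyGetD line ((k : Int) + i - PySem.Int.floordiv (line.length : Int) 2) 0)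
          else a)
        (List.replicate line.length 2) := by
  unfold shift_line
  rw [PySem.List.pyRange_one, List.foldl_map]
  simp only [Int.sub_zero, Int.toNat_natCast, zero_add, PySem.List.pySetD_natCast]

lemma shift_line_getElem? (line : List Int) (i : Int) (j : Nat) :
    (shift_line line i)[j]? =
      if j < line.length ∧
          0 ≤ (j : Int) + i - PySem.Int.floordiv (line.length : Int) 2 ∧
          (j : Int) + i - PySem.Int.floordiv (line.length : Int) 2 < (line.length : Int)
      then some (PySem.List.pyGetD line ((j : Int) + i - PySem.Int.floordiv (line.length : Int) 2) 0)
      else if j < line.length then some 2 else none := by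
  rw [shift_line_eq_fold]
  rw [foldl_set_getElem?
    (fun k => 0 ≤ (k : Int) + i - PySem.Int.floordiv (line.length : Int) 2 ∧
      (k : Int) + i - PySem.Int.floordiv (line.length : Int) 2 < (line.length : Int))]
  simp only [List.length_replicate, List.getElem?_replicate]
  by_cases hj : j < line.length
  · simp [hj, and_comm]
  · simp [hj]

-- ===== VERDICT (by name: the statement is the Claim_ definition above) =====
theorem shift_line_spec : Claim_equal_shift_line := by
  intro line i _
  unfold Spec_shift_line shift_line_alt
  dsimp only
  apply List.ext_getElem?
  intro j
  rw [shift_line_getElem?]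
  set mid := PySem.Int.floordiv (line.length : Int) 2 with hmid
  set off := i - mid with hoff
  have harg : (j : Int) + i - mid = (j : Int) + off := by omega
  rw [harg]
  have hn : (0:Int) ≤ (line.length : Int) := by positivity
  by_cases h1 : off < -(line.length : Int)
  · -- shift entirely off to the left of the window: everything is 2
    have hs : min ((line.length : Int)) (max 0 (-off)) = (line.length : Int) := by omega
    have ht : max 0 (min ((line.length : Int)) ((line.length : Int) - off)) = (line.length : Int) := by omega
    rw [hs, ht]
    have hsl : PySem.List.slice line (some ((line.length : Int) + off)) (some ((line.length : Int) + off)) = ([] : List Int) := by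
      apply List.eq_nil_of_length_eq_zero
      rw [PySem.List.length_slice]
      omega
    rw [hsl]
    simp only [sub_self, Int.toNat_zero, List.replicate_zero, List.append_nil,
      Int.toNat_natCast, List.getElem?_replicate]
    by_cases hj : j < line.length
    · have hcond : ¬ (0 ≤ (j : Int) + off) := by omega
      simp [hj, hcond]
    · simp [hj]
  · by_cases h2 : (line.length : Int) < off
    · -- shift entirely off to the right of the window: everything is 2
      have hs : min ((line.length : Int)) (max 0 (-off)) = 0 := by omega
      have ht : max 0 (min ((line.length : Int)) ((line.length : Int) - off)) = 0 := by omega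
      rw [hs, ht]
      have hsl : PySem.List.slice line (some ((0:Int) + off)) (some ((0:Int) + off)) = ([] : List Int) := by
        apply List.eq_nil_of_length_eq_zero
        rw [PySem.List.length_slice]
        omega
      rw [hsl]
      simp only [Int.toNat_zero, List.replicate_zero, List.nil_append, sub_zero,
        Int.toNat_natCast, List.getElem?_replicate]
      have hcond : ¬ ((j : Int) + off < (line.length : Int)) := by omega
      by_cases hj : j < line.length <;> simp [hj, hcond]
    · by_cases h3 : 0 ≤ off
      · -- overlap, shifting right within the window
        have hs : min ((line.length : Int)) (max 0 (-off)) = 0 := by omega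
        have ht : max 0 (min ((line.length : Int)) ((line.length : Int) - off)) = (line.length : Int) - off := by omega
        rw [hs, ht]
        have hb : (line.length : Int) - off + off = (line.length : Int) := by ring
        rw [hb]
        rw [PySem.List.slice_toNat _ (by omega : (0:Int) ≤ 0 + off) (by omega : (0:Int) ≤ (line.length : Int))]
        simp only [Int.toNat_zero, List.replicate_zero, List.nil_append, zero_add,
          Int.toNat_natCast]
        have he : ((line.length : Int) - ((line.length : Int) - off)).toNat = off.toNat := by omega
        rw [he]
        simp only [List.getElem?_append, List.length_take, List.length_drop,
          List.getElem?_take, List.getElem?_drop, List.getElem?_replicate, Nat.min_self]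
        by_cases hj1 : j < line.length - off.toNat
        · have hcond : j < line.length ∧ 0 ≤ (j:Int) + off ∧ (j:Int) + off < (line.length:Int) :=
            ⟨by omega, by omega, by omega⟩
          rw [if_pos hcond, PySem.List.pyGetD_eq_getElem _ _ (by omega) (by omega)]
          rw [if_pos hj1]
          rw [List.getElem?_eq_getElem (by omega : off.toNat + j < line.length)]
          simp only [show ((j:Int) + off).toNat = off.toNat + j from by omega]
          rw [if_pos hj1]
        · have hcond : ¬ (j < line.length ∧ 0 ≤ (j:Int) + off ∧ (j:Int) + off < (line.length:Int)) := by
            omega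
          rw [if_neg hcond, if_neg hj1]
          by_cases hj : j < line.length
          · rw [if_pos hj, if_pos (by omega : j - (line.length - off.toNat) < off.toNat)]
          · rw [if_neg hj, if_neg (by omega : ¬ j - (line.length - off.toNat) < off.toNat)]
      · -- overlap, shifting left within the window
        have hs : min ((line.length : Int)) (max 0 (-off)) = -off := by omega
        have ht : max 0 (min ((line.length : Int)) ((line.length : Int) - off)) = (line.length : Int) := by omega
        rw [hs, ht]
        have ha : -off + off = (0:Int) := by ring
        rw [ha]
        rw [PySem.List.slice_toNat _ (by omega : (0:Int) ≤ 0) (by omega : (0:Int) ≤ (line.length : Int) + off)]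
        simp only [Int.toNat_zero, List.drop_zero, sub_self, List.replicate_zero,
          List.append_nil, Nat.sub_zero]
        simp only [List.getElem?_append, List.length_replicate, List.getElem?_replicate,
          List.getElem?_take]
        by_cases hj1 : j < (-off).toNat
        · have hcond : ¬ (j < line.length ∧ 0 ≤ (j:Int) + off ∧ (j:Int) + off < (line.length:Int)) := by
            omega
          rw [if_neg hcond, if_pos hj1, if_pos (by omega : j < line.length), if_pos hj1]
        · rw [if_neg hj1]
          by_cases hj : j < line.length
          · have hcond : j < line.length ∧ 0 ≤ (j:Int) + off ∧ (j:Int) + off < (line.length:Int) :=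
              ⟨hj, by omega, by omega⟩
            rw [if_pos hcond, PySem.List.pyGetD_eq_getElem _ _ (by omega) (by omega)]
            rw [if_pos (by omega : j - (-off).toNat < ((line.length : Int) + off).toNat)]
            rw [List.getElem?_eq_getElem (by omega : j - (-off).toNat < line.length)]
            simp only [show ((j:Int) + off).toNat = j - (-off).toNat from by omega]
          · have hcond : ¬ (j < line.length ∧ 0 ≤ (j:Int) + off ∧ (j:Int) + off < (line.length:Int)) := by
              omega
            rw [if_neg hcond, if_neg (by omega : ¬ j - (-off).toNat < ((line.length : Int) + off).toNat)]
            rw [if_neg (by omega : ¬ j < line.length)]
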